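-- pv_equiv track=rewrite | github.com/Daankrol/Completing-Bach-ML | reduce.py | reduce_to_pairs
-- ===== SOURCE A (Python) =====
-- def reduce_to_pairs(dat):
--
--     pairs = []
--     i = 0
--
--     while i < len(dat):
--         duration = 1
--         while i+1 < len(dat) and dat[i+1] == dat[i]:
--             if duration == 16:
--                 pairs.append([dat[i], duration])
--                 duration = 1
--             else:
--                 duration += 1
--             i += 1
--         pairs.append([dat[i], duration])
--         i += 1
--
--     return pairs
-- ===== SOURCE B (Python) =====
-- def reduce_to_pairs(dat):
--     n = len(dat)
--     starts = [i for i in range(n) if i == 0 or dat[i] != dat[i - 1]]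
--     out = []
--     for s, e in zip(starts, starts[1:] + [n]):
--         q, r = divmod(e - s - 1, 16)
--         out.extend([dat[s], 16] for _ in range(q))
--         out.append([dat[s], r + 1])
--     return out
-- ===== Notes on version B (the rewrite author's own statement) =====
-- stated objective: alternative
-- what changed: Replaces A's single pass with a mutable duration counter and cap-reset by staged passes: first compute the run-boundary index list by filtering adjacent-inequality positions, then pair each start with the next boundary and emit its chunks by closed-form divmod arithmetic (no counter, no capping loop).
import Mathlib
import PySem

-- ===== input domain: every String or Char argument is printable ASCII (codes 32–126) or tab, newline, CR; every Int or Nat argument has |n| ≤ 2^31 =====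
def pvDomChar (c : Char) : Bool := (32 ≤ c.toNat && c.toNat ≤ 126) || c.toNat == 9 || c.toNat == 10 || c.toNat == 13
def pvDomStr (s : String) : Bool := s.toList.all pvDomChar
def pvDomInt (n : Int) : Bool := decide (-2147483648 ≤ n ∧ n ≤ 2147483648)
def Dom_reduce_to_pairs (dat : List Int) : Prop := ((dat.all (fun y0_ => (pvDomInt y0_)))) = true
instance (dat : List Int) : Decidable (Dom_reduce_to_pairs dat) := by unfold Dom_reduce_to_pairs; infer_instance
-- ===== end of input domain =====

-- B replaces A's single-pass counter-with-cap-reset loop by staged passes: a run-boundary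
-- index list (filter of adjacent-inequality positions) plus closed-form divmod chunk
-- expansion per run (objective: alternative; same return value, no speed claim).

-- ===== PORT A =====
-- inner while loop of A: state (i, duration, pairs); duration is a Python int that is always ≥ 1, kept as Nat
def reduce_to_pairs_inner (dat : List Int) (i : Nat) (duration : Nat) (pairs : List (List Int)) :
    Nat × Nat × List (List Int) :=
  if _h : i + 1 < dat.length ∧ dat[i+1]! = dat[i]! then
    if duration = 16 then
      reduce_to_pairs_inner dat (i+1) 1 (pairs ++ [[dat[i]!, (duration : Int)]])
    else
      reduce_to_pairs_inner dat (i+1) (duration + 1) pairs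
  else (i, duration, pairs)
termination_by dat.length - i
decreasing_by
  all_goals exact Nat.sub_succ_lt_self dat.length i (Nat.lt_of_succ_lt _h.1)

-- outer while loop of A; 'fuel' only makes the recursion total: i grows by at least 1
-- per iteration, so fuel = dat.length never runs out before 'i < len(dat)' fails
def reduce_to_pairs_outer (dat : List Int) : Nat → Nat → List (List Int) → List (List Int)
  | 0, _, pairs => pairs
  | fuel+1, i, pairs =>
      if i < dat.length then
        let r := reduce_to_pairs_inner dat i 1 pairs
        reduce_to_pairs_outer dat fuel (r.1 + 1) (r.2.2 ++ [[dat[r.1]!, (r.2.1 : Int)]])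
      else pairs

def reduce_to_pairs (dat : List Int) : List (List Int) :=
  reduce_to_pairs_outer dat dat.length 0 []

-- ===== PORT B =====
-- Source B: starts = [i for i in range(n) if i == 0 or dat[i] != dat[i-1]]
def rtpStarts (dat : List Int) : List Nat :=
  (List.range dat.length).filter (fun i => i == 0 || !(dat[i]! == dat[i-1]!))

-- one loop body of Source B: divmod(e - s - 1, 16), then q chunks [v,16] and the final [v, r+1]
def rtpExpand (dat : List Int) (s e : Nat) : List (List Int) :=
  List.replicate ((e - s - 1) / 16) [dat[s]!, (16 : Int)] ++
    [[dat[s]!, (((e - s - 1) % 16 : Nat) : Int) + 1]]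

def reduce_to_pairs_alt (dat : List Int) : List (List Int) :=
  let starts := rtpStarts dat
  (starts.zip (starts.drop 1 ++ [dat.length])).foldl
    (fun out p => out ++ rtpExpand dat p.1 p.2) []

-- ===== PRECONDITION & SPEC =====
def Spec_reduce_to_pairs (dat : List Int) (out : List (List Int)) : Prop := out = reduce_to_pairs_alt dat
instance (dat : List Int) (out : List (List Int)) : Decidable (Spec_reduce_to_pairs dat out) := by unfold Spec_reduce_to_pairs; infer_instance

-- ===== CLAIM (what is proved, stated in full; the proofs are below) =====
def Claim_equal_reduce_to_pairs : Prop := ∀ (dat : List Int), Dom_reduce_to_pairs dat → Spec_reduce_to_pairs dat (reduce_to_pairs dat)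

-- ===== LEMMAS AND PROOFS =====

-- canonical run-length form both ports are reduced to: consecutive runs with counts,
-- and the 'strictly greater than 16' chunk expansion
def rtpGroups : List Int → List (Int × Nat)
  | [] => []
  | x :: xs =>
      (x, 1 + (xs.takeWhile (fun y => y == x)).length) ::
        rtpGroups (xs.dropWhile (fun y => y == x))
termination_by l => l.length
decreasing_by
  exact Nat.lt_succ_of_le (List.IsSuffix.length_le (List.dropWhile_suffix (fun y => y == x)))

def rtpChunks (v : Int) (c : Nat) : List (List Int) :=
  if h : 16 < c then [v, 16] :: rtpChunks v (c - 16) else [[v, (c : Int)]]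
termination_by c
decreasing_by
  exact Nat.sub_lt (Nat.lt_trans (Nat.succ_pos 15) h) (Nat.succ_pos 15)

def rtpCanon (dat : List Int) : List (List Int) :=
  (rtpGroups dat).flatMap (fun p => rtpChunks p.1 p.2)

theorem rtpGroups_nil : rtpGroups [] = [] := by rw [rtpGroups]

theorem rtpGroups_cons (x : Int) (xs : List Int) :
    rtpGroups (x :: xs) =
      (x, 1 + (xs.takeWhile (fun y => y == x)).length) ::
        rtpGroups (xs.dropWhile (fun y => y == x)) := by
  rw [rtpGroups]

-- pure description of A's inner loop over a run of k further equal elements: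
-- the flushed chunks and the final duration
def rtpF (v : Int) (d : Nat) (k : Nat) : List (List Int) :=
  match k with
  | 0 => []
  | k+1 => if d = 16 then [v, 16] :: rtpF v 1 k else rtpF v (d+1) k

def rtpD (d : Nat) (k : Nat) : Nat :=
  match k with
  | 0 => d
  | k+1 => if d = 16 then rtpD 1 k else rtpD (d+1) k

theorem rtpF_chunks (v : Int) : ∀ (k d : Nat), 1 ≤ d → d ≤ 16 →
    rtpF v d k ++ [[v, (rtpD d k : Int)]] = rtpChunks v (d + k) := by
  intro k
  induction k with
  | zero =>
      intro d h1 h16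
      rw [rtpF, rtpD, rtpChunks, dif_neg (by omega)]
      simp
  | succ k ih =>
      intro d h1 h16
      by_cases hd : d = 16
      · subst hd
        rw [rtpF, rtpD, if_pos rfl, if_pos rfl]
        rw [rtpChunks, dif_pos (by omega)]
        have h : 16 + (k + 1) - 16 = 1 + k := by omega
        rw [h, ← ih 1 (by omega) (by omega)]
        simp
      · rw [rtpF, rtpD, if_neg hd, if_neg hd, ih (d+1) (by omega) (by omega)]
        congr 1
        omega

theorem inner_eq (dat : List Int) : ∀ (n i : Nat), dat.length - i ≤ n → ∀ (d : Nat) (pairs : List (List Int)),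
    reduce_to_pairs_inner dat i d pairs =
      (i + ((dat.drop (i+1)).takeWhile (fun y => y == dat[i]!)).length,
       rtpD d ((dat.drop (i+1)).takeWhile (fun y => y == dat[i]!)).length,
       pairs ++ rtpF dat[i]! d ((dat.drop (i+1)).takeWhile (fun y => y == dat[i]!)).length) := by
  intro n
  induction n with
  | zero =>
      intro i hn d pairs
      have hdrop : dat.drop (i+1) = [] := List.drop_eq_nil_of_le (by omega)
      rw [reduce_to_pairs_inner, dif_neg (by rintro ⟨h, -⟩; omega), hdrop]
      simp [rtpD, rtpF]
  | succ n ih =>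
      intro i hn d pairs
      by_cases hg : i + 1 < dat.length ∧ dat[i+1]! = dat[i]!
      · obtain ⟨hlt, heq⟩ := hg
        have hdrop : dat.drop (i+1) = dat[i+1]! :: dat.drop (i+2) := by
          rw [List.drop_eq_getElem_cons hlt, getElem!_pos dat (i+1) hlt]
        have htw : (dat.drop (i+1)).takeWhile (fun y => y == dat[i]!) =
            dat[i]! :: (dat.drop (i+2)).takeWhile (fun y => y == dat[i]!) := by
          rw [hdrop, heq, List.takeWhile_cons, if_pos (by simp)]
        have h12 : i + 1 + 1 = i + 2 := by omega
        by_cases hd : d = 16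
        · subst hd
          rw [reduce_to_pairs_inner, dif_pos ⟨hlt, heq⟩, if_pos rfl,
            ih (i+1) (by omega) 1 (pairs ++ [[dat[i]!, ((16:Nat) : Int)]]), heq, h12, htw]
          simp [rtpF, rtpD]
          omega
        · rw [reduce_to_pairs_inner, dif_pos ⟨hlt, heq⟩, if_neg hd,
            ih (i+1) (by omega) (d+1) pairs, heq, h12, htw]
          simp [rtpF, rtpD, hd]
          omega
      · have htw : (dat.drop (i+1)).takeWhile (fun y => y == dat[i]!) = [] := by
          by_cases hlt : i + 1 < dat.length
          · have hdrop : dat.drop (i+1) = dat[i+1]! :: dat.drop (i+2) := by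
              rw [List.drop_eq_getElem_cons hlt, getElem!_pos dat (i+1) hlt]
            rw [hdrop, List.takeWhile_cons, if_neg]
            simp only [beq_iff_eq]
            intro hc
            exact hg ⟨hlt, by simpa using hc⟩
          · rw [List.drop_eq_nil_of_le (by omega)]
            simp
        rw [reduce_to_pairs_inner, dif_neg hg, htw]
        simp [rtpD, rtpF]

theorem outer_eq (dat : List Int) : ∀ (n i : Nat), dat.length - i ≤ n → ∀ (pairs : List (List Int)),
    reduce_to_pairs_outer dat n i pairs = pairs ++ rtpCanon (dat.drop i) := by
  intro n
  induction n with
  | zero =>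
      intro i hn pairs
      rw [reduce_to_pairs_outer, List.drop_eq_nil_of_le (by omega)]
      simp [rtpCanon, rtpGroups_nil]
  | succ n ih =>
      intro i hn pairs
      by_cases hi : i < dat.length
      · set v := dat[i]! with hv
        set l := dat.drop (i+1) with hl
        set k := (l.takeWhile (fun y => y == v)).length with hk
        have hkle : k ≤ l.length := by
          rw [hk]; exact (List.takeWhile_prefix _).length_le
        have hllen : l.length = dat.length - (i+1) := by rw [hl]; simp
        have hdropi : dat.drop i = v :: l := by
          rw [hl, hv, List.drop_eq_getElem_cons hi, getElem!_pos dat i hi]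
        have hvk : dat[i+k]! = v := by
          cases hk0 : k with
          | zero => simpa [hk0] using hv.symm
          | succ j =>
              have hjl : j < l.length := by omega
              have hmem : l[j] ∈ l.takeWhile (fun y => y == v) := by
                have hg : (l.takeWhile (fun y => y == v))[j]'(by omega) = l[j] :=
                  (List.takeWhile_prefix _).getElem (by omega)
                rw [← hg]
                exact List.getElem_mem _
              have hveq : l[j] = v := by
                have := List.mem_takeWhile_imp hmem
                simpa using this
              rw [getElem!_pos dat (i+(j+1)) (by omega)]
              have h1 : l[j]'hjl = dat[i+1+j]'(by omega) := List.getElem_drop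
              have h2 : i + (j+1) = i + 1 + j := by omega
              rw [← hveq, h1]
              simp [h2]
        have hdroprest : dat.drop (i+k+1) = l.dropWhile (fun y => y == v) := by
          have h1 : dat.drop (i+k+1) = l.drop k := by
            rw [hl, List.drop_drop]
            congr 1
            omega
          rw [h1, hk]
          conv_lhs => rw [← List.takeWhile_append_dropWhile (p := fun y => y == v) (l := l)]
          rw [List.drop_append_of_le_length (by simp)]
          simp
        have hB : rtpCanon (v :: l) =
            rtpChunks v (1 + k) ++ rtpCanon (l.dropWhile (fun y => y == v)) := by
          unfold rtpCanon
          rw [rtpGroups_cons, List.flatMap_cons, ← hk]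
        rw [reduce_to_pairs_outer, if_pos hi]
        simp only [inner_eq dat dat.length i (by omega) 1 pairs, ← hv, ← hl, ← hk]
        rw [hvk, ih (i+k+1) (by omega) _, hdroprest, hdropi, hB,
          ← rtpF_chunks v k 1 (by omega) (by omega)]
        simp
      · rw [reduce_to_pairs_outer, if_neg hi, List.drop_eq_nil_of_le (by omega)]
        simp [rtpCanon, rtpGroups_nil]

-- ---- B side: relate the boundary-index list to the run recursion ----

-- starts at positions ≥ 1, relative to a previous value
def rtpStartsAux (prev : Int) : List Int → List Nat
  | [] => []
  | y :: ys =>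
      if y = prev then (rtpStartsAux y ys).map (· + 1)
      else 0 :: (rtpStartsAux y ys).map (· + 1)

theorem rtpStarts_nil : rtpStarts [] = [] := by
  simp [rtpStarts]

-- the filter over range(n), restricted to indices ≥ 1, seen as a recursion on the tail
theorem rtpStarts_filter_aux : ∀ (xs : List Int) (x : Int),
    (List.range xs.length).filter (fun j => !(xs[j]! == (x :: xs)[j]!)) = rtpStartsAux x xs := by
  intro xs
  induction xs with
  | nil => intro x; simp [rtpStartsAux]
  | cons y ys ih =>
      intro x
      rw [rtpStartsAux]
      have hr : List.range (y :: ys).length = 0 :: (List.range ys.length).map Nat.succ := by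
        simpa using List.range_succ_eq_map (n := ys.length)
      rw [hr, List.filter_cons, List.filter_map]
      have hc : ((List.range ys.length).filter
            ((fun j => !((y :: ys)[j]! == (x :: y :: ys)[j]!)) ∘ Nat.succ)).map Nat.succ =
          (rtpStartsAux y ys).map (· + 1) := by
        rw [← ih y]
        congr 1
      by_cases hyx : y = x
      · subst hyx
        simp only [if_pos, hc]
        simp
      · rw [hc]
        simp [hyx]

theorem rtpStarts_cons (x : Int) (xs : List Int) :
    rtpStarts (x :: xs) = 0 :: (rtpStartsAux x xs).map (· + 1) := by
  unfold rtpStarts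
  have hr : List.range (x :: xs).length = 0 :: (List.range xs.length).map Nat.succ := by
    simpa using List.range_succ_eq_map (n := xs.length)
  rw [hr, List.filter_cons, if_pos (by simp), List.filter_map]
  congr 1
  rw [← rtpStarts_filter_aux xs x]
  congr 1

theorem rtpStartsAux_run (xs : List Int) : ∀ (x : Int),
    rtpStartsAux x xs =
      (rtpStarts (xs.dropWhile (fun y => y == x))).map
        (· + (xs.takeWhile (fun y => y == x)).length) := by
  induction xs with
  | nil => intro x; simp [rtpStartsAux, rtpStarts_nil]
  | cons y ys ih =>
      intro x
      by_cases hyx : y = x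
      · subst hyx
        rw [rtpStartsAux, if_pos rfl, ih y, List.takeWhile_cons, if_pos (by simp),
          List.dropWhile_cons, if_pos (by simp), List.map_map]
        congr 1
      · rw [rtpStartsAux, if_neg hyx, List.takeWhile_cons, if_neg (by simp [hyx]),
          List.dropWhile_cons, if_neg (by simp [hyx]), rtpStarts_cons]
        simp

theorem rtpStarts_run (x : Int) (xs : List Int) :
    rtpStarts (x :: xs) =
      0 :: (rtpStarts (xs.dropWhile (fun y => y == x))).map
        (· + ((xs.takeWhile (fun y => y == x)).length + 1)) := by
  rw [rtpStarts_cons, rtpStartsAux_run]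
  simp

theorem rtpStarts_lt (dat : List Int) (s : Nat) (hs : s ∈ rtpStarts dat) : s < dat.length := by
  have := List.mem_filter.mp hs
  exact List.mem_range.mp this.1

theorem rtpChunks_closed (v : Int) : ∀ (c : Nat), 1 ≤ c →
    rtpChunks v c =
      List.replicate ((c - 1) / 16) [v, (16 : Int)] ++ [[v, (((c - 1) % 16 : Nat) : Int) + 1]] := by
  intro c
  induction c using Nat.strong_induction_on with
  | _ c ih =>
    intro h1
    rw [rtpChunks]
    by_cases h : 16 < c
    · rw [dif_pos h, ih (c - 16) (by omega) (by omega)]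
      have hq : (c - 1) / 16 = (c - 16 - 1) / 16 + 1 := by omega
      have hr : (c - 1) % 16 = (c - 16 - 1) % 16 := by omega
      rw [hq, hr, List.replicate_succ]
      simp
    · rw [dif_neg h]
      have hq : (c - 1) / 16 = 0 := by omega
      have hv : (((c - 1) % 16 : Nat) : Int) + 1 = (c : Int) := by omega
      rw [hq, hv]
      simp

theorem foldl_append_expand (f : Nat × Nat → List (List Int)) :
    ∀ (l : List (Nat × Nat)) (acc : List (List Int)),
      l.foldl (fun out p => out ++ f p) acc = acc ++ l.flatMap f := by
  intro l
  induction l with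
  | nil => intro acc; simp
  | cons p t ih => intro acc; simp [List.foldl_cons, ih, List.flatMap_cons]

theorem flatMap_congr_mem {α β : Type} (l : List α) (f g : α → List β)
    (h : ∀ p ∈ l, f p = g p) : l.flatMap f = l.flatMap g := by
  induction l with
  | nil => simp
  | cons a t ih =>
      rw [List.flatMap_cons, List.flatMap_cons, h a (by simp),
        ih (fun p hp => h p (by simp [hp]))]

theorem alt_eq_canon (dat : List Int) : reduce_to_pairs_alt dat = rtpCanon dat := by
  match dat with
  | [] => simp [reduce_to_pairs_alt, rtpStarts_nil, rtpCanon, rtpGroups_nil]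
  | x :: xs =>
    have ih := alt_eq_canon (xs.dropWhile (fun y => y == x))
    set k := (xs.takeWhile (fun y => y == x)).length with hk
    set d := xs.dropWhile (fun y => y == x) with hd
    have hsplit : xs = xs.takeWhile (fun y => y == x) ++ d := by
      rw [hd, List.takeWhile_append_dropWhile]
    have hlen : (x :: xs).length = d.length + (k + 1) := by
      conv_lhs => rw [hsplit]
      simp [hk]
      omega
    have hdropk : (x :: xs).drop (k + 1) = d := by
      conv_lhs => rw [hsplit]
      have : (x :: (xs.takeWhile (fun y => y == x) ++ d)).drop (k + 1) =
          (xs.takeWhile (fun y => y == x) ++ d).drop k := by simp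
      rw [this, hk, List.drop_left]
    have hgetshift : ∀ a, a < d.length → (x :: xs)[a + (k + 1)]! = d[a]! := by
      intro a ha
      rw [getElem!_pos d a ha, getElem!_pos (x :: xs) (a + (k + 1)) (by omega)]
      have h2 : d[a]'ha = ((x :: xs).drop (k + 1))[a]'(by rw [hdropk]; exact ha) :=
        List.getElem_of_eq hdropk.symm ha
      have h3 : ((x :: xs).drop (k + 1))[a]'(by rw [hdropk]; exact ha) =
          (x :: xs)[(k + 1) + a]'(by omega) := List.getElem_drop
      rw [h2, h3]
      congr 1
      omega
    have hexp : ∀ p ∈ (rtpStarts d).zip ((rtpStarts d).drop 1 ++ [d.length]),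
        rtpExpand (x :: xs) (p.1 + (k + 1)) (p.2 + (k + 1)) = rtpExpand d p.1 p.2 := by
      intro p hp
      have hp1 : p.1 ∈ rtpStarts d := (List.of_mem_zip hp).1
      have hlt := rtpStarts_lt d p.1 hp1
      unfold rtpExpand
      rw [hgetshift p.1 hlt]
      have : p.2 + (k + 1) - (p.1 + (k + 1)) - 1 = p.2 - p.1 - 1 := by omega
      rw [this]
    have hfirst : rtpExpand (x :: xs) 0 (k + 1) = rtpChunks x (k + 1) := by
      unfold rtpExpand
      rw [rtpChunks_closed x (k + 1) (by omega)]
      simp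
    have hcanon : rtpCanon (x :: xs) = rtpChunks x (k + 1) ++ rtpCanon d := by
      unfold rtpCanon
      rw [rtpGroups_cons, List.flatMap_cons, ← hd, ← hk, Nat.add_comm 1 k]
    have hstarts : rtpStarts (x :: xs) = 0 :: (rtpStarts d).map (· + (k + 1)) := by
      rw [rtpStarts_run, ← hd, ← hk]
    rw [hcanon, ← hfirst, ← ih]
    cases hdc : d with
    | nil =>
        rw [hdc] at hstarts hlen
        rw [reduce_to_pairs_alt, hstarts, rtpStarts_nil, reduce_to_pairs_alt,
          rtpStarts_nil]
        simp [hlen]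
    | cons z zs =>
        rw [hdc] at hstarts hlen hexp
        rw [rtpStarts_cons z zs] at hstarts
        rw [reduce_to_pairs_alt, hstarts]
        rw [reduce_to_pairs_alt, rtpStarts_cons z zs]
        simp only [List.map_cons, List.drop_succ_cons, List.drop_zero, Nat.zero_add,
          List.cons_append]
        rw [List.zip_cons_cons, foldl_append_expand, List.flatMap_cons]
        rw [foldl_append_expand]
        simp only [List.nil_append]
        congr 1
        have hmapsnd : ((rtpStartsAux z zs).map (· + 1)).map (· + (k + 1)) ++ [(x :: xs).length] =
            (((rtpStartsAux z zs).map (· + 1)) ++ [(z :: zs).length]).map (· + (k + 1)) := by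
          rw [List.map_append, List.map_cons]
          simp [hlen]
        have hmapfst : (k + 1) :: ((rtpStartsAux z zs).map (· + 1)).map (· + (k + 1)) =
            ((0 :: (rtpStartsAux z zs).map (· + 1)).map (· + (k + 1))) := by
          simp
        rw [hmapsnd, hmapfst]
        rw [List.zip_map, List.flatMap_map]
        apply flatMap_congr_mem
        intro p hp
        have := hexp p (by rw [rtpStarts_cons z zs]; simpa using hp)
        simpa using this
termination_by dat.length
decreasing_by
  exact Nat.lt_succ_of_le (List.IsSuffix.length_le (List.dropWhile_suffix (fun y => y == x)))

-- ===== VERDICT (by name: the statement is the Claim_ definition above) =====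
theorem reduce_to_pairs_spec : Claim_equal_reduce_to_pairs := by
  intro dat _
  unfold Spec_reduce_to_pairs reduce_to_pairs
  rw [outer_eq dat dat.length 0 (by omega) [], alt_eq_canon]
  simp
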